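-- pv_equiv track=rewrite | github.com/TheNeuralBit/aoc2017 | 24/sol1.py | strongest
-- ===== SOURCE A (Python) =====
-- def strongest(needed, pipes):
--     available = [i for i, p in enumerate(pipes) if needed in p]
--     if len(available) == 0:
--         return 0
--
--     m = -1
--     for idx in available:
--         pipe = pipes[idx]
--         next_needed = pipe[0] if pipe.index(needed) == 1 else pipe[1]
--         result = sum(pipe) + strongest(next_needed, pipes[:idx] + pipes[idx+1:])
--         if result > m: m = result
--
--     return m
-- ===== SOURCE B (Python) =====
-- def strongest(needed, pipes):
--     used = [False] * len(pipes)
--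
--     def search(port):
--         found = False
--         best = -1
--         for i, (a, b) in enumerate(pipes):
--             if used[i] or (a != port and b != port):
--                 continue
--             used[i] = True
--             cand = a + b + search(b if a == port else a)
--             used[i] = False
--             found = True
--             if cand > best:
--                 best = cand
--         return best if found else 0
--
--     return search(needed)
-- ===== Notes on version B (the rewrite author's own statement) =====
-- stated objective: alternative
-- what changed: A's recursion builds a fresh sliced copy of the pipe list for every branch and prefilters matching indices; B keeps the pipe list fixed and backtracks over a mutable used[] mask, scanning once per call with no list copies.
import Mathlib
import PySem

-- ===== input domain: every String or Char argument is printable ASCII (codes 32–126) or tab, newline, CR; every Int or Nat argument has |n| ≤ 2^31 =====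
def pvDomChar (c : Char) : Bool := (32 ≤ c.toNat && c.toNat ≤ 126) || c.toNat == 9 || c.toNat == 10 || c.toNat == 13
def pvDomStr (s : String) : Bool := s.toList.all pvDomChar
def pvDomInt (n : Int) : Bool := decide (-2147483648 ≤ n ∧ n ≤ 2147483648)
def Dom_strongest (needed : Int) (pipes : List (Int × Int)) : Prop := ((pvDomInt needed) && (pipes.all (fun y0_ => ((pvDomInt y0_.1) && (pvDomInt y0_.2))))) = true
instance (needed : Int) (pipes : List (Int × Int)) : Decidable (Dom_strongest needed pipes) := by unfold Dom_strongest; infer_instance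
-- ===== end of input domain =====

-- B replaces A's slice-and-copy recursion by backtracking over a fixed list with a
-- used[] mask (alternative decomposition; B mutates only its own local mask).


-- ===== PORT A =====
-- termination helper: removing one (in-range) pipe shortens the list
theorem pv_rest_lt (needed : Int) (pipes : List (Int × Int)) (idx : Int)
    (h : idx ∈ ((PySem.List.enumerate pipes 0).filter
        (fun ip => ip.2.1 == needed || ip.2.2 == needed)).map (fun ip => ip.1)) :
    (PySem.List.slice pipes none (some idx) ++
     PySem.List.slice pipes (some (idx + 1)) none).length < pipes.length := by
  obtain ⟨ip, hf, rfl⟩ := List.mem_map.mp h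
  have hmem := List.mem_filter.mp hf |>.1
  obtain ⟨k, hk, rfl⟩ := (PySem.List.mem_enumerate_iff _ _ _).mp hmem
  simp only [zero_add]
  have h1 : PySem.List.slice pipes none (some ((k : Int))) = pipes.take k :=
    PySem.List.slice_to_natCast ..
  have h2 : PySem.List.slice pipes (some ((k : Int) + 1)) none = pipes.drop (k + 1) := by
    have : ((k : Int) + 1) = ((k + 1 : Nat) : Int) := by push_cast; ring
    rw [this, PySem.List.slice_from_natCast]
  rw [h1, h2]
  simp [List.length_take, List.length_drop]
  omega

-- literal port of A: available = matching indices; if none, 0; else loop with m = -1.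
-- pipes[idx] and pipe.index(needed) never raise here (idx comes from the membership
-- filter), so pyGetD's default (0,0) and the hand-written index test are exact.
def strongest (needed : Int) (pipes : List (Int × Int)) : Int :=
  let available : List Int :=
    ((PySem.List.enumerate pipes 0).filter
      (fun ip => ip.2.1 == needed || ip.2.2 == needed)).map (fun ip => ip.1)
  if available = [] then 0
  else
    available.attach.foldl
      (fun m idx =>
        let pipe := PySem.List.pyGetD pipes idx.1 (0, 0)
        -- pipe.index(needed) == 1  ⟺  pipe[0] ≠ needed  (needed ∈ pipe is guaranteed)
        let next_needed := if (if pipe.1 == needed then (0 : Int) else 1) == 1 then pipe.1 else pipe.2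
        let result := pipe.1 + pipe.2 +
          strongest next_needed
            (PySem.List.slice pipes none (some idx.1) ++
             PySem.List.slice pipes (some (idx.1 + 1)) none)
        if result > m then result else m)
      (-1)
termination_by pipes.length
decreasing_by exact pv_rest_lt needed pipes idx.1 idx.2

-- ===== PORT B =====
-- Source B's inner `search(port)`: the pipe list is fixed, `used` is the mask.  The fuel
-- argument is only a totality guard (the Python recursion terminates because each
-- call marks one more pipe used); strongest_alt supplies provably sufficient fuel.
-- The enumerate index is always in range of `used`, so pyGetD/​toNat/​set are exact.
def bsearch (pipes : List (Int × Int)) : Nat → Int → List Bool → Int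
  | 0, _, _ => 0
  | gas + 1, port, used =>
    let st := (PySem.List.enumerate pipes 0).foldl
      (fun (st : Bool × Int) x =>
        if PySem.List.pyGetD used x.1 false || (x.2.1 != port && x.2.2 != port) then st
        else
          let cand := x.2.1 + x.2.2 +
            bsearch pipes gas (if x.2.1 == port then x.2.2 else x.2.1) (used.set x.1.toNat true)
          (true, if cand > st.2 then cand else st.2))
      (false, -1)
    if st.1 then st.2 else 0

def strongest_alt (needed : Int) (pipes : List (Int × Int)) : Int :=
  bsearch pipes (pipes.length + 1) needed (List.replicate pipes.length false)

-- ===== PRECONDITION & SPEC =====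
def Spec_strongest (needed : Int) (pipes : List (Int × Int)) (out : Int) : Prop := out = strongest_alt needed pipes
instance (needed : Int) (pipes : List (Int × Int)) (out : Int) : Decidable (Spec_strongest needed pipes out) := by unfold Spec_strongest; infer_instance

-- ===== CLAIM (what is proved, stated in full; the proofs are below) =====
def Claim_equal_strongest : Prop := ∀ (needed : Int) (pipes : List (Int × Int)), Dom_strongest needed pipes → Spec_strongest needed pipes (strongest needed pipes)

-- ===== LEMMAS AND PROOFS =====

-- the filtered enumeration A's loop runs over
def fE (needed : Int) (pipes : List (Int × Int)) : List (Int × (Int × Int)) :=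
  (PySem.List.enumerate pipes 0).filter (fun ip => ip.2.1 == needed || ip.2.2 == needed)

-- the candidate value A computes for one matching (index, pipe) pair
def pvCand (needed : Int) (pipes : List (Int × Int)) (ip : Int × (Int × Int)) : Int :=
  ip.2.1 + ip.2.2 +
    strongest (if ip.2.1 == needed then ip.2.2 else ip.2.1)
      (PySem.List.slice pipes none (some ip.1) ++ PySem.List.slice pipes (some (ip.1 + 1)) none)

def max2 (m v : Int) : Int := if v > m then v else m

theorem mem_fE_shape (needed : Int) (pipes : List (Int × Int)) (ip : Int × (Int × Int))
    (h : ip ∈ fE needed pipes) :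
    ∃ (k : Nat) (hk : k < pipes.length), ip = ((k : Int), pipes[k]) := by
  have hmem := List.mem_filter.mp h |>.1
  obtain ⟨k, hk, rfl⟩ := (PySem.List.mem_enumerate_iff _ _ _).mp hmem
  exact ⟨k, hk, by simp⟩

-- A's loop body, named so the attach-fold can be rewritten
abbrev aBody (needed : Int) (pipes : List (Int × Int)) (m i : Int) : Int :=
  let pipe := PySem.List.pyGetD pipes i (0, 0)
  let next_needed := if (if pipe.1 == needed then (0 : Int) else 1) == 1 then pipe.1 else pipe.2
  let result := pipe.1 + pipe.2 +
    strongest next_needed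
      (PySem.List.slice pipes none (some i) ++ PySem.List.slice pipes (some (i + 1)) none)
  if result > m then result else m

theorem strongest_eq (needed : Int) (pipes : List (Int × Int)) :
    strongest needed pipes =
      if fE needed pipes = [] then 0
      else (fE needed pipes).foldl (fun m ip => max2 m (pvCand needed pipes ip)) (-1) := by
  rw [strongest]
  have hiff : (((PySem.List.enumerate pipes 0).filter
      (fun ip => ip.2.1 == needed || ip.2.2 == needed)).map (fun ip => ip.1)) = []
      ↔ fE needed pipes = [] := by rw [fE]; exact List.map_eq_nil_iff
  by_cases hfe : fE needed pipes = []
  · rw [if_pos (hiff.mpr hfe), if_pos hfe]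
  · rw [if_neg (fun h => hfe (hiff.mp h)), if_neg hfe]
    rw [List.foldl_attach (f := aBody needed pipes)]
    rw [(rfl : ((PySem.List.enumerate pipes 0).filter
      (fun ip => ip.2.1 == needed || ip.2.2 == needed)) = fE needed pipes), List.foldl_map]
    apply List.foldl_ext
    intro m ip hip
    obtain ⟨k, hk, rfl⟩ := mem_fE_shape needed pipes ip hip
    have hget : PySem.List.pyGetD pipes ((k : Int)) (0, 0) = pipes[k] := by
      rw [PySem.List.pyGetD_natCast, List.getD_eq_getElem pipes (0, 0) hk]
    simp only [aBody, hget, pvCand, max2]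
    by_cases hfst : pipes[k].1 = needed <;> simp [hfst]

-- the list of available pipes a mask denotes
def compress : List (Int × Int) → List Bool → List (Int × Int)
  | p :: ps, u :: us => if u then compress ps us else p :: compress ps us
  | _, _ => []

theorem compress_append (l1 l2 : List (Int × Int)) (u1 u2 : List Bool)
    (h : u1.length = l1.length) :
    compress (l1 ++ l2) (u1 ++ u2) = compress l1 u1 ++ compress l2 u2 := by
  induction l1 generalizing u1 with
  | nil => cases u1 with | nil => rfl | cons => simp at h
  | cons p ps ih =>
    cases u1 with
    | nil => simp at h
    | cons u us =>
      simp only [List.length_cons, Nat.succ.injEq] at h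
      cases u <;> simp [compress, ih us h]

theorem compress_replicate (l : List (Int × Int)) :
    compress l (List.replicate l.length false) = l := by
  induction l with
  | nil => rfl
  | cons p ps ih => simpa [compress, List.replicate_succ] using ih

-- A's candidate values over a list, as a structural recursion with a context
def acands (port : Int) : List (Int × Int) → (List (Int × Int) → List (Int × Int)) → List Int
  | [], _ => []
  | p :: cs, ctx =>
    (if p.1 == port || p.2 == port
     then [p.1 + p.2 + strongest (if p.1 == port then p.2 else p.1) (ctx cs)] else [])
    ++ acands port cs (fun l => ctx (p :: l))

-- B's candidate values over a masked list, same context device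
def bcands (port : Int) : List (Int × Int) → List Bool → (List (Int × Int) → List (Int × Int)) → List Int
  | p :: ps, u :: us, ctx =>
    if u then bcands port ps us ctx
    else
      (if p.1 == port || p.2 == port
       then [p.1 + p.2 + strongest (if p.1 == port then p.2 else p.1) (ctx (compress ps us))] else [])
      ++ bcands port ps us (fun l => ctx (p :: l))
  | _, _, _ => []

theorem bcands_eq_acands (port : Int) (ps : List (Int × Int)) (us : List Bool)
    (h : us.length = ps.length) (ctx : List (Int × Int) → List (Int × Int)) :
    bcands port ps us ctx = acands port (compress ps us) ctx := by
  induction ps generalizing us ctx with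
  | nil => cases us with | nil => rfl | cons => simp at h
  | cons p ps ih =>
    cases us with
    | nil => simp at h
    | cons u us =>
      simp only [List.length_cons, Nat.succ.injEq] at h
      cases u with
      | true => simp [bcands, compress, ih us h]
      | false => simp [bcands, compress, acands, ih us h]

-- acands with context (cp ++ ·) is exactly A's positional candidate list
theorem acands_spec (port : Int) (cs : List (Int × Int)) (cp : List (Int × Int)) :
    acands port cs (fun l => cp ++ l) =
      ((PySem.List.enumerate cs (cp.length : Int)).filter
          (fun ip => ip.2.1 == port || ip.2.2 == port)).map
        (fun ip => pvCand port (cp ++ cs) ip) := by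
  induction cs generalizing cp with
  | nil => simp [acands, PySem.List.enumerate_nil]
  | cons p cs ih =>
    rw [PySem.List.enumerate_cons]
    have htail : acands port cs (fun l => (cp ++ [p]) ++ l) =
        ((PySem.List.enumerate cs ((cp ++ [p]).length : Int)).filter
            (fun ip => ip.2.1 == port || ip.2.2 == port)).map
          (fun ip => pvCand port ((cp ++ [p]) ++ cs) ip) := ih (cp ++ [p])
    have hctx : (fun l => (cp ++ [p]) ++ l) = (fun l => cp ++ (p :: l)) := by
      funext l; simp
    have hlen : (((cp ++ [p]).length : Nat) : Int) = (cp.length : Int) + 1 := by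
      simp
    have hfull : (cp ++ [p]) ++ cs = cp ++ p :: cs := by simp
    rw [hctx, hlen, hfull] at htail
    have hcand : pvCand port (cp ++ p :: cs) ((cp.length : Int), p) =
        p.1 + p.2 + strongest (if p.1 == port then p.2 else p.1) (cp ++ cs) := by
      have h1 : PySem.List.slice (cp ++ p :: cs) none (some ((cp.length : Int))) = cp := by
        rw [PySem.List.slice_to_natCast]
        simp
      have h2 : PySem.List.slice (cp ++ p :: cs) (some ((cp.length : Int) + 1)) none = cs := by
        have : ((cp.length : Int) + 1) = ((cp.length + 1 : Nat) : Int) := by push_cast; ring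
        rw [this, PySem.List.slice_from_natCast]
        simp [List.drop_append]
      simp only [pvCand, h1, h2]
    by_cases hm : (p.1 == port || p.2 == port) = true
    · simp [acands, hm, htail, hcand]
    · have hm' : (p.1 == port || p.2 == port) = false := by simpa using hm
      simp [acands, hm', htail]

-- max-accumulating fold with a found flag
def bmax (st : Bool × Int) (v : Int) : Bool × Int := (true, if v > st.2 then v else st.2)

theorem foldl_bmax (L : List Int) (b : Bool) (m : Int) :
    L.foldl bmax (b, m) = ((b || !L.isEmpty), L.foldl max2 m) := by
  induction L generalizing b m with
  | nil => simp
  | cons v L ih => simp [bmax, max2, ih]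

-- place the k-th element of a concatenation
theorem pyGetD_append_len (u1 : List Bool) (u : Bool) (u2 : List Bool) :
    PySem.List.pyGetD (u1 ++ u :: u2) ((u1.length : Int)) false = u := by
  rw [PySem.List.pyGetD_natCast]
  simp [List.getD]

theorem set_append_len (u1 : List Bool) (u : Bool) (u2 : List Bool) (v : Bool) :
    (u1 ++ u :: u2).set u1.length v = u1 ++ v :: u2 := by
  induction u1 with
  | nil => rfl
  | cons a u1 ih => simp [ih]

theorem count_false_append (u1 u2 : List Bool) :
    (u1 ++ u2).count false = u1.count false + u2.count false := List.count_append ..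

-- the loop body of bsearch, named for the proofs (definitionally the port's lambda)
def bstep (P : List (Int × Int)) (U : List Bool) (gas : Nat) (port : Int)
    (st : Bool × Int) (x : Int × (Int × Int)) : Bool × Int :=
  if PySem.List.pyGetD U x.1 false || (x.2.1 != port && x.2.2 != port) then st
  else
    let cand := x.2.1 + x.2.2 +
      bsearch P gas (if x.2.1 == port then x.2.2 else x.2.1) (U.set x.1.toNat true)
    (true, if cand > st.2 then cand else st.2)

theorem bstep_skip (P : List (Int × Int)) (U : List Bool) (gas : Nat) (port : Int)
    (st : Bool × Int) (x : Int × (Int × Int))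
    (h : (PySem.List.pyGetD U x.1 false || (x.2.1 != port && x.2.2 != port)) = true) :
    bstep P U gas port st x = st := by
  simp [bstep, h]

theorem bstep_take (P : List (Int × Int)) (U : List Bool) (gas : Nat) (port : Int)
    (st : Bool × Int) (x : Int × (Int × Int))
    (h : (PySem.List.pyGetD U x.1 false || (x.2.1 != port && x.2.2 != port)) = false) :
    bstep P U gas port st x =
      bmax st (x.2.1 + x.2.2 +
        bsearch P gas (if x.2.1 == port then x.2.2 else x.2.1) (U.set x.1.toNat true)) := by
  simp [bstep, bmax, h]

-- the inner loop of bsearch, compared with bcands, one suffix at a time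
theorem bsearch_loop (gas : Nat) (port : Int) (P : List (Int × Int)) (U : List Bool)
    (hIH : ∀ (port' : Int) (used' : List Bool), used'.length = P.length →
      used'.count false < gas → bsearch P gas port' used' = strongest port' (compress P used'))
    (ps : List (Int × Int)) :
    ∀ (us upre : List Bool) (pre : List (Int × Int)) (st : Bool × Int),
    P = pre ++ ps → U = upre ++ us → us.length = ps.length → upre.length = pre.length →
    U.count false ≤ gas →
    (PySem.List.enumerate ps ((pre.length : Nat) : Int)).foldl (bstep P U gas port) st
      = (bcands port ps us (fun l => compress pre upre ++ l)).foldl bmax st := by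
  induction ps with
  | nil =>
    intro us upre pre st hP hU hlen hlen2 hcnt
    cases us with
    | nil => simp [PySem.List.enumerate_nil, bcands]
    | cons => simp at hlen
  | cons p ps ih =>
    intro us upre pre st hP hU hlen hlen2 hcnt
    cases us with
    | nil => simp at hlen
    | cons u us =>
      simp only [List.length_cons, Nat.succ.injEq] at hlen
      rw [PySem.List.enumerate_cons, List.foldl_cons]
      have hgetU : PySem.List.pyGetD U ((pre.length : Nat) : Int) false = u := by
        rw [hU, ← hlen2]; exact pyGetD_append_len upre u us
      have hshift : ((pre.length : Nat) : Int) + 1 = (((pre ++ [p]).length : Nat) : Int) := by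
        simp
      have hP' : P = (pre ++ [p]) ++ ps := by simp [hP]
      have hU' : U = (upre ++ [u]) ++ us := by simp [hU]
      have hlen2' : (upre ++ [u]).length = (pre ++ [p]).length := by simp [hlen2]
      cases u with
      | true =>
        rw [bstep_skip P U gas port st _ (by rw [hgetU]; simp)]
        rw [hshift, ih us (upre ++ [true]) (pre ++ [p]) st hP' hU' hlen hlen2' hcnt]
        have hc : compress (pre ++ [p]) (upre ++ [true]) = compress pre upre := by
          rw [compress_append _ _ _ _ hlen2]; simp [compress]
        simp [bcands, hc]
      | false =>
        by_cases hm : (p.1 == port || p.2 == port) = true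
        · have hskip : (PySem.List.pyGetD U ((pre.length : Nat) : Int) false
              || (p.1 != port && p.2 != port)) = false := by
            rw [hgetU]
            rcases Bool.or_eq_true_iff.mp hm with h | h <;> simp_all
          rw [bstep_take P U gas port st _ hskip]
          have htoNat : (((pre.length : Nat) : Int)).toNat = upre.length := by
            simp [hlen2]
          have hset : U.set (((pre.length : Nat) : Int)).toNat true = (upre ++ [true]) ++ us := by
            rw [htoNat, hU, set_append_len]; simp
          have hcntset : ((upre ++ [true]) ++ us).count false < gas := by
            have h1 : U.count false = upre.count false + (1 + us.count false) := by
              rw [hU, count_false_append]; simp; ring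
            have h2 : ((upre ++ [true]) ++ us).count false
                = upre.count false + us.count false := by
              rw [count_false_append, count_false_append]; simp
            omega
          have hlenset : ((upre ++ [true]) ++ us).length = P.length := by
            rw [hP]; simp [hlen, hlen2]
          have hrec : bsearch P gas (if p.1 == port then p.2 else p.1)
                (U.set (((pre.length : Nat) : Int)).toNat true)
              = strongest (if p.1 == port then p.2 else p.1)
                  (compress pre upre ++ compress ps us) := by
            rw [hset, hIH _ _ hlenset hcntset]
            congr 1
            have hlt : (upre ++ [true]).length = (pre ++ [p]).length := by simp [hlen2]
            rw [hP', show upre ++ [true] ++ us = (upre ++ [true]) ++ us from rfl,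
              compress_append _ _ _ _ hlt, compress_append _ _ _ _ hlen2]
            simp [compress]
          rw [hrec, hshift, ih us (upre ++ [false]) (pre ++ [p]) _ hP' hU' hlen hlen2' hcnt]
          have hc : compress (pre ++ [p]) (upre ++ [false]) = compress pre upre ++ [p] := by
            rw [compress_append _ _ _ _ hlen2]; simp [compress]
          have hctx : (fun l => compress (pre ++ [p]) (upre ++ [false]) ++ l)
              = (fun l => compress pre upre ++ (p :: l)) := by
            funext l; rw [hc]; simp
          rw [hctx]
          simp [bcands, hm]
        · have hskip : (PySem.List.pyGetD U ((pre.length : Nat) : Int) false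
              || (p.1 != port && p.2 != port)) = true := by
            rw [hgetU]
            revert hm
            cases hp1 : p.1 == port <;> cases hp2 : p.2 == port <;> simp [hp1, hp2, bne]
          rw [bstep_skip P U gas port st _ hskip]
          rw [hshift, ih us (upre ++ [false]) (pre ++ [p]) st hP' hU' hlen hlen2' hcnt]
          have hc : compress (pre ++ [p]) (upre ++ [false]) = compress pre upre ++ [p] := by
            rw [compress_append _ _ _ _ hlen2]; simp [compress]
          have hctx : (fun l => compress (pre ++ [p]) (upre ++ [false]) ++ l)
              = (fun l => compress pre upre ++ (p :: l)) := by
            funext l; rw [hc]; simp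
          rw [hctx]
          simp [bcands, hm]

-- the main invariant: bsearch with enough fuel computes A on the unmasked pipes
theorem bsearch_eq (gas : Nat) :
    ∀ (P : List (Int × Int)) (U : List Bool) (port : Int),
      U.length = P.length → U.count false < gas →
      bsearch P gas port U = strongest port (compress P U) := by
  induction gas with
  | zero => intro P U port _ h; omega
  | succ gas ih =>
    intro P U port hlen hcnt
    show (let st := (PySem.List.enumerate P 0).foldl (bstep P U gas port) (false, -1);
      if st.1 then st.2 else 0) = _
    have hloop := bsearch_loop gas port P U
      (fun port' used' h1 h2 => ih P used' port' h1 h2)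
      P U [] [] (false, -1) rfl rfl hlen rfl (by omega)
    simp only [List.length_nil, Nat.cast_zero] at hloop
    rw [hloop, bcands_eq_acands port P U hlen]
    have hA := acands_spec port (compress P U) []
    rw [show (fun l : List (Int × Int) => compress ([] : List (Int × Int)) ([] : List Bool) ++ l)
        = (fun l : List (Int × Int) => ([] : List (Int × Int)) ++ l) from rfl, hA, foldl_bmax]
    simp only [List.length_nil, Nat.cast_zero]
    rw [strongest_eq port (compress P U)]
    have hfE : (fE port (compress P U)) =
        (PySem.List.enumerate (compress P U) 0).filter
          (fun ip => ip.2.1 == port || ip.2.2 == port) := rfl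
    by_cases hfe : fE port (compress P U) = []
    · rw [if_pos hfe]
      rw [hfE] at hfe
      simp [hfe]
    · rw [if_neg hfe]
      rw [hfE] at hfe
      have hne : ((PySem.List.enumerate (compress P U) 0).filter
          (fun ip => ip.2.1 == port || ip.2.2 == port)).map
            (fun ip => pvCand port (compress P U) ip) ≠ [] := by
        simpa using hfe
      simp only [Bool.false_or]
      rw [List.isEmpty_eq_false_iff_exists_mem.mpr (by
        rcases List.exists_mem_of_ne_nil _ hne with ⟨x, hx⟩; exact ⟨x, hx⟩)]
      simp [List.foldl_map, fE]

theorem alt_eq (needed : Int) (pipes : List (Int × Int)) :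
    strongest_alt needed pipes = strongest needed pipes := by
  rw [strongest_alt,
    bsearch_eq (pipes.length + 1) pipes (List.replicate pipes.length false) needed
      (by simp) (by simp),
    compress_replicate]

-- ===== VERDICT (by name: the statement is the Claim_ definition above) =====
theorem strongest_spec : Claim_equal_strongest := by
  intro needed pipes _
  unfold Spec_strongest
  exact (alt_eq needed pipes).symm
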